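-- pv_equiv track=rewrite | github.com/qcstyrogit-main/erp_ai_assistant | erp_ai_assistant/api/export.py | _summary_group_fields
-- ===== SOURCE A (Python) =====
-- from typing import Any, Dict, List
--
-- def _summary_group_fields(rows: list[dict[str, Any]]) -> list[str]:
--     if not rows:
--         return []
--     keys = {key for row in rows if isinstance(row, dict) for key in row.keys()}
--     ordered = [
--         "territory",
--         "payment_terms",
--         "department",
--         "designation",
--         "customer_group",
--         "supplier_group",
--         "status",
--         "company",
--         "currency",
--     ]
--     return [field for field in ordered if field in keys]
-- ===== SOURCE B (Python) =====
-- def _summary_group_fields(rows: list) -> list: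
--     ordered = [
--         "territory",
--         "payment_terms",
--         "department",
--         "designation",
--         "customer_group",
--         "supplier_group",
--         "status",
--         "company",
--         "currency",
--     ]
--     return [f for f in ordered
--             if any(isinstance(r, dict) and f in r for r in rows)]
-- ===== Notes on version B (the rewrite author's own statement) =====
-- stated objective: alternative
-- what changed: Inverts the loop nesting: instead of first collecting all row keys into a set and then filtering the fixed ordered list against it, B loops over the fixed ordered list and tests each field by scanning the rows directly (any), dropping the auxiliary key set and the explicit empty-rows early return.
import Mathlib
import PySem

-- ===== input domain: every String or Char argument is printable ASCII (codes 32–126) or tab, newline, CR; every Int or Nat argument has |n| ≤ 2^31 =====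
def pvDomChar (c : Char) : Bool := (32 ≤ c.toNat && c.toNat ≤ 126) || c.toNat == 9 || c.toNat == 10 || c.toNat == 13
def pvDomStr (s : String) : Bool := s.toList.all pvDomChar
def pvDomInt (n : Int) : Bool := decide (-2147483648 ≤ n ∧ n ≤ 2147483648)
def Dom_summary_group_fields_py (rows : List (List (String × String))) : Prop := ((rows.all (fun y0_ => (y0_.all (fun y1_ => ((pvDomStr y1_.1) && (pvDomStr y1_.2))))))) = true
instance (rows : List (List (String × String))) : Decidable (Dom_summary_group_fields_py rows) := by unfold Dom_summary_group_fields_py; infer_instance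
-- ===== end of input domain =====

-- B inverts A's loop nesting: it scans the rows per fixed field instead of building a key set; same return value (alternative decomposition).

-- ===== PORT A =====
-- the fixed preset field list of _summary_group_fields
def pvOrderedFields : List String :=
  ["territory", "payment_terms", "department", "designation", "customer_group",
   "supplier_group", "status", "company", "currency"]

-- keys = {key for row in rows ... for key in row.keys()} (set comprehension, built left to right;
-- the isinstance(row, dict) guard is always true under the type convention)
def summary_group_fields_py (rows : List (List (String × String))) : List String :=
  if rows = [] then []
  else
    let keys : PySem.Set String :=
      rows.foldl (fun s row => row.foldl (fun s kv => PySem.Set.add s kv.1) s) PySem.Set.empty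
    pvOrderedFields.filter (fun field => PySem.Set.contains keys field)

-- ===== PORT B =====
-- [f for f in ordered if any(f in r for r in rows)]
def summary_group_fields_py_alt (rows : List (List (String × String))) : List String :=
  pvOrderedFields.filter (fun f => rows.any (fun r => r.any (fun kv => kv.1 == f)))

-- ===== PRECONDITION & SPEC =====
def Spec_summary_group_fields_py (rows : List (List (String × String))) (out : List String) : Prop := out = summary_group_fields_py_alt rows
instance (rows : List (List (String × String))) (out : List String) : Decidable (Spec_summary_group_fields_py rows out) := by unfold Spec_summary_group_fields_py; infer_instance

-- ===== CLAIM (what is proved, stated in full; the proofs are below) =====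
def Claim_equal_summary_group_fields_py : Prop := ∀ (rows : List (List (String × String))), Dom_summary_group_fields_py rows → Spec_summary_group_fields_py rows (summary_group_fields_py rows)

-- ===== LEMMAS AND PROOFS =====

theorem mem_foldl_add_row (f : String) (row : List (String × String)) (s : List String) :
    f ∈ row.foldl (fun s kv => PySem.Set.add s kv.1) s ↔ f ∈ s ∨ row.any (fun kv => kv.1 == f) := by
  induction row generalizing s with
  | nil => simp
  | cons kv rest ih =>
      simp only [List.foldl_cons, ih, PySem.Set.mem_add, List.any_cons]
      constructor
      · rintro (⟨h | h⟩ | h)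
        · exact Or.inl h
        · exact Or.inr (by simp [h])
        · exact Or.inr (by simp [h])
      · rintro (h | h)
        · exact Or.inl (Or.inl h)
        · rcases (by simpa using h : kv.1 = f ∨ rest.any (fun kv => kv.1 == f) = true) with h | h
          · exact Or.inl (Or.inr h.symm)
          · exact Or.inr h

theorem mem_foldl_add_rows (f : String) (rows : List (List (String × String))) (s : List String) :
    f ∈ rows.foldl (fun s row => row.foldl (fun s kv => PySem.Set.add s kv.1) s) s ↔
      f ∈ s ∨ rows.any (fun r => r.any (fun kv => kv.1 == f)) := by
  induction rows generalizing s with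
  | nil => simp
  | cons row rest ih =>
      simp only [List.foldl_cons, ih, mem_foldl_add_row, List.any_cons, Bool.or_eq_true]
      tauto

-- ===== VERDICT (by name: the statement is the Claim_ definition above) =====
theorem summary_group_fields_py_spec : Claim_equal_summary_group_fields_py := by
  intro rows _
  unfold Spec_summary_group_fields_py summary_group_fields_py summary_group_fields_py_alt
  by_cases h : rows = []
  · simp [h]
  · simp only [if_neg h]
    apply List.filter_congr
    intro f _
    simp only [PySem.Set.contains_eq_listContains, List.contains_iff_mem]
    rw [Bool.eq_iff_iff, List.contains_iff_mem, mem_foldl_add_rows f rows PySem.Set.empty]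
    simp [PySem.Set.empty]
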